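-- pv_equiv track=rewrite | github.com/LiuJiajun100938083/School-AI-Assistant-Demo | app/domains/vision/geometry_descriptor.py | strip_prefix
-- ===== SOURCE A (Python) =====
-- def strip_prefix(token: str) -> str:
--     """
--     去除工程前綴，轉為教學展示標籤。
--     S_AB → AB, P_A → A, Tri_ABC → △ABC, Ang_ABC → ∠ABC, Cir_O → ⊙O
--     """
--     if not token:
--         return token
--     for prefix, replacement in [
--         ("S_", ""), ("P_", ""), ("Tri_", "△"),
--         ("Ang_", "∠"), ("Cir_", "⊙"), ("Poly_", ""),
--         ("L_", ""), ("Ray_", ""),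
--     ]:
--         if token.startswith(prefix):
--             return replacement + token[len(prefix):]
--     return token
-- ===== SOURCE B (Python) =====
-- _PREFIX_MAP = {
--     "S_": "", "P_": "", "Tri_": "\u25b3", "Ang_": "\u2220",
--     "Cir_": "\u2299", "Poly_": "", "L_": "", "Ray_": "",
-- }
--
--
-- def strip_prefix(token: str) -> str:
--     idx = token.find("_")
--     if idx == -1:
--         return token
--     rep = _PREFIX_MAP.get(token[:idx + 1])
--     if rep is None:
--         return token
--     return rep + token[idx + 1:]
-- ===== Notes on version B (the rewrite author's own statement) =====
-- stated objective: idiomatic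
-- what changed: Replaces A's sequential startswith scan over the eight (prefix, replacement) pairs with a single search for the first underscore, one slice through it, and a hash-map lookup of that slice.
import Mathlib
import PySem

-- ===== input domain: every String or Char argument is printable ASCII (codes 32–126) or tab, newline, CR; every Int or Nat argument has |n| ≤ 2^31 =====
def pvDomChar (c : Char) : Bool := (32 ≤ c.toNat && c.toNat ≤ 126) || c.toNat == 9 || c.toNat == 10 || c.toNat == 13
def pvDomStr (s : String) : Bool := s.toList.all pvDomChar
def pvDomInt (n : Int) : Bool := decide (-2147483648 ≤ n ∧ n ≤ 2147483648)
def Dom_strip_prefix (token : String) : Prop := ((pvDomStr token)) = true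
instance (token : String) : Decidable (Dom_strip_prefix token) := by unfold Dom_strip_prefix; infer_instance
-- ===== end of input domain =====

-- B replaces A's sequential startswith scan by one find('_') and a single slice + dict lookup (idiomatic; same asymptotic cost).

-- ===== PORT A =====
-- the for-loop over the literal (prefix, replacement) list, with its early return
def stripLoop (token : String) : List (String × String) → String
  | [] => token
  | (p, r) :: rest =>
      if PySem.Str.startswith token p then r ++ PySem.Str.slice token (some (PySem.Str.len p)) none
      else stripLoop token rest

def strip_prefix (token : String) : String :=
  if token = "" then token
  else stripLoop token
    [("S_", ""), ("P_", ""), ("Tri_", "△"), ("Ang_", "∠"),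
     ("Cir_", "⊙"), ("Poly_", ""), ("L_", ""), ("Ray_", "")]

-- ===== PORT B =====
def pvPrefixMap : PySem.Dict String String :=
  PySem.Dict.ofList
    [("S_", ""), ("P_", ""), ("Tri_", "△"), ("Ang_", "∠"),
     ("Cir_", "⊙"), ("Poly_", ""), ("L_", ""), ("Ray_", "")]

def strip_prefix_alt (token : String) : String :=
  let idx := PySem.Str.find token "_"
  if idx = -1 then token
  else
    match PySem.Dict.get? pvPrefixMap (PySem.Str.slice token none (some (idx + 1))) with
    | none => token
    | some rep => rep ++ PySem.Str.slice token (some (idx + 1)) none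

-- ===== PRECONDITION & SPEC =====
def Spec_strip_prefix (token : String) (out : String) : Prop := out = strip_prefix_alt token
instance (token : String) (out : String) : Decidable (Spec_strip_prefix token out) := by unfold Spec_strip_prefix; infer_instance

-- ===== CLAIM (what is proved, stated in full; the proofs are below) =====
def Claim_equal_strip_prefix : Prop := ∀ (token : String), Dom_strip_prefix token → Spec_strip_prefix token (strip_prefix token)

-- ===== LEMMAS AND PROOFS =====

-- python's s.find('_') points at the first underscore
theorem find_first (q rest : List Char) (hq : '_' ∉ q) :
    PySem.Chars.find (q ++ '_' :: rest) ['_'] = (q.length : Int) := by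
  have hinf : ['_'] <:+: (q ++ '_' :: rest) := ⟨q, rest, by simp⟩
  have h0 : 0 ≤ PySem.Chars.find (q ++ '_' :: rest) ['_'] :=
    (PySem.Chars.find_nonneg_iff _ _).mpr hinf
  obtain ⟨hpre, hmin⟩ := PySem.Chars.find_spec (s := q ++ '_' :: rest) (sub := ['_']) h0
  have hk : (PySem.Chars.find (q ++ '_' :: rest) ['_']).toNat = q.length := by
    rcases Nat.lt_trichotomy (PySem.Chars.find (q ++ '_' :: rest) ['_']).toNat q.length with h | h | h
    · exfalso
      obtain ⟨t, ht⟩ := hpre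
      have hd : (q ++ '_' :: rest).drop (PySem.Chars.find (q ++ '_' :: rest) ['_']).toNat
          = q.drop (PySem.Chars.find (q ++ '_' :: rest) ['_']).toNat ++ '_' :: rest := by
        rw [List.drop_append_of_le_length (le_of_lt h)]
      have hget : q.drop (PySem.Chars.find (q ++ '_' :: rest) ['_']).toNat
          = q[(PySem.Chars.find (q ++ '_' :: rest) ['_']).toNat]
            :: q.drop ((PySem.Chars.find (q ++ '_' :: rest) ['_']).toNat + 1) :=
        List.drop_eq_getElem_cons h
      rw [hd, hget] at ht
      simp only [List.singleton_append] at ht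
      obtain ⟨h', -⟩ := List.cons_eq_cons.mp ht
      exact hq (h' ▸ List.getElem_mem h)
    · exact h
    · exact absurd ⟨rest, by simp⟩ (hmin q.length h)
  omega

-- a slice token[:b] (0 ≤ b) that equals p forces token to start with p
theorem slice_ne_of_not_startswith (token p : String) (b : Int) (h0 : 0 ≤ b)
    (hb : ¬ PySem.Str.startswith token p = true) :
    PySem.Str.slice token none (some b) ≠ p := by
  intro h
  apply hb
  have htl := congrArg String.toList h
  simp only [PySem.Str.toList_slice, PySem.Chars.slice_eq_listSlice] at htl
  rw [PySem.List.slice_to _ h0] at htl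
  have hpre : p.toList <+: token.toList := htl ▸ List.take_prefix _ _
  have := (PySem.Chars.startswith_iff token.toList p.toList).mpr hpre
  simpa using this

-- B on a token that starts with a dict key
theorem alt_on_match (token : String) (q rest : List Char) (key rep : String)
    (hq : '_' ∉ q) (hkey : key.toList = q ++ ['_'])
    (hlen : PySem.Str.len key = (q.length : Int) + 1)
    (htl : token.toList = (q ++ ['_']) ++ rest)
    (hget : PySem.Dict.get? pvPrefixMap key = some rep) :
    strip_prefix_alt token = rep ++ PySem.Str.slice token (some (PySem.Str.len key)) none := by
  have hf : PySem.Str.find token "_" = (q.length : Int) := by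
    have h' : token.toList = q ++ '_' :: rest := by simpa using htl
    have hul : ("_" : String).toList = ['_'] := by decide
    simp only [PySem.Str.find_eq, h', hul]
    exact find_first q rest hq
  have hne : ((q.length : Int)) ≠ -1 := by omega
  have hslice : PySem.Str.slice token none (some ((q.length : Int) + 1)) = key := by
    apply String.toList_inj.mp
    simp only [PySem.Str.toList_slice, PySem.Chars.slice_eq_listSlice]
    rw [PySem.List.slice_to _ (by omega : (0:Int) ≤ (q.length : Int) + 1)]
    have hcast : ((q.length : Int) + 1).toNat = q.length + 1 := by omega
    rw [hcast, htl, hkey]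
    rw [List.take_append_of_le_length (by simp)]
    simp
  unfold strip_prefix_alt
  simp only [hf, if_neg hne, hslice, hget]
  rw [hlen]

-- ===== VERDICT helper: the main equality =====
theorem strip_eq (token : String) : strip_prefix token = strip_prefix_alt token := by
  by_cases h0 : token = ""
  · subst h0; decide
  · have hstart : ∀ (p : String), PySem.Str.startswith token p = true →
        ∃ rest, token.toList = p.toList ++ rest := by
      intro p hp
      have : p.toList <+: token.toList := by
        simpa [PySem.Chars.startswith_iff] using hp
      obtain ⟨t, ht⟩ := this
      exact ⟨t, ht.symm⟩
    by_cases h1 : PySem.Str.startswith token "S_" = true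
    · obtain ⟨rest, htl⟩ := hstart _ h1
      have hb := alt_on_match token ['S'] rest "S_" "" (by decide) (by decide) (by decide)
        (by simpa using htl) (by decide)
      rw [strip_prefix, if_neg h0]
      simp only [stripLoop]
      rw [if_pos h1, hb]
    · by_cases h2 : PySem.Str.startswith token "P_" = true
      · obtain ⟨rest, htl⟩ := hstart _ h2
        have hb := alt_on_match token ['P'] rest "P_" "" (by decide) (by decide) (by decide)
          (by simpa using htl) (by decide)
        rw [strip_prefix, if_neg h0]
        simp only [stripLoop]
        rw [if_neg h1, if_pos h2, hb]
      · by_cases h3 : PySem.Str.startswith token "Tri_" = true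
        · obtain ⟨rest, htl⟩ := hstart _ h3
          have hb := alt_on_match token ['T','r','i'] rest "Tri_" "△" (by decide) (by decide) (by decide)
            (by simpa using htl) (by decide)
          rw [strip_prefix, if_neg h0]
          simp only [stripLoop]
          rw [if_neg h1, if_neg h2, if_pos h3, hb]
        · by_cases h4 : PySem.Str.startswith token "Ang_" = true
          · obtain ⟨rest, htl⟩ := hstart _ h4
            have hb := alt_on_match token ['A','n','g'] rest "Ang_" "∠" (by decide) (by decide) (by decide)
              (by simpa using htl) (by decide)
            rw [strip_prefix, if_neg h0]
            simp only [stripLoop]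
            rw [if_neg h1, if_neg h2, if_neg h3, if_pos h4, hb]
          · by_cases h5 : PySem.Str.startswith token "Cir_" = true
            · obtain ⟨rest, htl⟩ := hstart _ h5
              have hb := alt_on_match token ['C','i','r'] rest "Cir_" "⊙" (by decide) (by decide) (by decide)
                (by simpa using htl) (by decide)
              rw [strip_prefix, if_neg h0]
              simp only [stripLoop]
              rw [if_neg h1, if_neg h2, if_neg h3, if_neg h4, if_pos h5, hb]
            · by_cases h6 : PySem.Str.startswith token "Poly_" = true
              · obtain ⟨rest, htl⟩ := hstart _ h6
                have hb := alt_on_match token ['P','o','l','y'] rest "Poly_" "" (by decide) (by decide) (by decide)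
                  (by simpa using htl) (by decide)
                rw [strip_prefix, if_neg h0]
                simp only [stripLoop]
                rw [if_neg h1, if_neg h2, if_neg h3, if_neg h4, if_neg h5, if_pos h6, hb]
              · by_cases h7 : PySem.Str.startswith token "L_" = true
                · obtain ⟨rest, htl⟩ := hstart _ h7
                  have hb := alt_on_match token ['L'] rest "L_" "" (by decide) (by decide) (by decide)
                    (by simpa using htl) (by decide)
                  rw [strip_prefix, if_neg h0]
                  simp only [stripLoop]
                  rw [if_neg h1, if_neg h2, if_neg h3, if_neg h4, if_neg h5, if_neg h6, if_pos h7, hb]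
                · by_cases h8 : PySem.Str.startswith token "Ray_" = true
                  · obtain ⟨rest, htl⟩ := hstart _ h8
                    have hb := alt_on_match token ['R','a','y'] rest "Ray_" "" (by decide) (by decide) (by decide)
                      (by simpa using htl) (by decide)
                    rw [strip_prefix, if_neg h0]
                    simp only [stripLoop]
                    rw [if_neg h1, if_neg h2, if_neg h3, if_neg h4, if_neg h5, if_neg h6, if_neg h7, if_pos h8, hb]
                  · -- no prefix matches: both return token
                    have hA : strip_prefix token = token := by
                      rw [strip_prefix, if_neg h0]
                      simp only [stripLoop]
                      rw [if_neg h1, if_neg h2, if_neg h3, if_neg h4, if_neg h5,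
                        if_neg h6, if_neg h7, if_neg h8]
                    rw [hA]
                    by_cases hf : PySem.Str.find token "_" = -1
                    · have hf' : PySem.Chars.find token.toList ['_'] = -1 := by simpa using hf
                      simp [strip_prefix_alt, hf']
                    · have hf' : ¬ PySem.Chars.find token.toList ['_'] = -1 := by simpa using hf
                      have hb0 : 0 ≤ PySem.Str.find token "_" + 1 := by
                        have h := PySem.Chars.neg_one_le_find token.toList ("_" : String).toList
                        simp only [PySem.Str.find_eq] at hf ⊢
                        omega
                      have n1 := slice_ne_of_not_startswith token "S_" _ hb0 h1
                      have n2 := slice_ne_of_not_startswith token "P_" _ hb0 h2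
                      have n3 := slice_ne_of_not_startswith token "Tri_" _ hb0 h3
                      have n4 := slice_ne_of_not_startswith token "Ang_" _ hb0 h4
                      have n5 := slice_ne_of_not_startswith token "Cir_" _ hb0 h5
                      have n6 := slice_ne_of_not_startswith token "Poly_" _ hb0 h6
                      have n7 := slice_ne_of_not_startswith token "L_" _ hb0 h7
                      have n8 := slice_ne_of_not_startswith token "Ray_" _ hb0 h8
                      have hfe : PySem.Str.find token "_" = PySem.Chars.find token.toList ['_'] := by
                        simp
                      rw [hfe] at n1 n2 n3 n4 n5 n6 n7 n8
                      have hnone : PySem.Dict.get? pvPrefixMap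
                          (PySem.Str.slice token none (some (PySem.Chars.find token.toList ['_'] + 1)))
                          = none := by
                        have hmk : pvPrefixMap = PySem.Dict.mk
                            [("S_", ""), ("P_", ""), ("Tri_", "△"), ("Ang_", "∠"),
                             ("Cir_", "⊙"), ("Poly_", ""), ("L_", ""), ("Ray_", "")] := by rfl
                        rw [hmk]
                        simp [PySem.Dict.get?, beq_iff_eq,
                          Ne.symm n1, Ne.symm n2, Ne.symm n3, Ne.symm n4,
                          Ne.symm n5, Ne.symm n6, Ne.symm n7, Ne.symm n8]
                      simp [strip_prefix_alt, hf', hnone]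

-- ===== VERDICT (by name: the statement is the Claim_ definition above) =====
theorem strip_prefix_spec : Claim_equal_strip_prefix := by
  intro token _
  unfold Spec_strip_prefix
  exact strip_eq token
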